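-- pv_equiv track=rewrite | github.com/cciprianmihai/Map-Generation-From-Overlapping-Microscopy-Images-Using-Stitching-methods | full_pipeline.py | poz
-- ===== SOURCE A (Python) =====
-- def poz(matrix_size, i):
--   init_i = i
--
--   if i < 1:
--     return None
--   if i > (matrix_size * matrix_size) - 1:
--     return None
--
--   max_line = matrix_size - 1
--
--   diag_nr = 1
--   x = diag_nr
--   y = 0
--   prev_poz = 0, 0
--   while True:
--     i -= 1
--     if i == 0:
--       if init_i < ((matrix_size * (matrix_size + 1)) // 2):
--         prev_x, prev_y = prev_poz
--         if prev_x == 0: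
--           return x, y, prev_x + prev_y + 1, prev_x + prev_y + 1
--         else:
--           return x, y, prev_x + prev_y + 1, prev_x + prev_y
--       return x, y, matrix_size, matrix_size
--
--     if i == 1:
--       prev_poz = x, y
--
--     if x == 0 or y == max_line:
--       diag_nr += 1
--
--       if diag_nr > max_line:
--         x = max_line
--         y = diag_nr - max_line
--       else:
--         x = diag_nr
--         y = 0
--     else:
--       x -= 1
--       y += 1
-- ===== SOURCE B (Python) =====
-- def poz(matrix_size, i):
--     n = matrix_size
--     if n < 2 or i < 1 or i > n * n - 1:
--         return None
--     # skip whole anti-diagonals instead of walking cell by cell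
--     d, start = 1, 1
--     while True:
--         length = d + 1 if d <= n - 1 else 2 * n - 1 - d
--         if i < start + length:
--             break
--         start += length
--         d += 1
--     t = i - start
--     if d <= n - 1:
--         x, y = d - t, t
--     else:
--         x, y = n - 1 - t, d - n + 1 + t
--     if i >= n * (n + 1) // 2:
--         return x, y, n, n
--     s = x + y - 1 if t == 0 else x + y
--     if y == 0:
--         return x, y, s + 1, s + 1
--     return x, y, s + 1, s
-- ===== Notes on version B (the rewrite author's own statement) =====
-- stated objective: faster
-- what changed: B replaces A's cell-by-cell walk (i loop iterations maintaining x,y and the previous cell) by a per-diagonal skip: it scans anti-diagonals by their lengths to locate the diagonal containing i, then computes the cell and the previous-cell quantities arithmetically from the offset.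
-- outside the precondition, e.g. on poz(-3, 3): A returns (-4, 6, -3, -3), B returns None
import Mathlib
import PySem

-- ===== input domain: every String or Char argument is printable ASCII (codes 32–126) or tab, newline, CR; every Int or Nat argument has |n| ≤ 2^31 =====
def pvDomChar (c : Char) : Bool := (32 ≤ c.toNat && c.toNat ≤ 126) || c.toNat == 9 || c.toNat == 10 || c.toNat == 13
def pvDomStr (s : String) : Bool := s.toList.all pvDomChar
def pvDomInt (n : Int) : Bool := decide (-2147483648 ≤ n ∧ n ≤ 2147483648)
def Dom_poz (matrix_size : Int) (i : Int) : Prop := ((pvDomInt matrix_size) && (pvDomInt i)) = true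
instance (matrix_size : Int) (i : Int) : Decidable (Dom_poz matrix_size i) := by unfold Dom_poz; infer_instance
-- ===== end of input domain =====

-- B replaces A's O(i) cell-by-cell walk by an O(n) per-diagonal skip (objective: faster, asymptotic).

-- ===== PORT A =====
-- A's `while True` loop; the fuel is the loop counter i itself (the loop decrements i each
-- iteration and returns exactly when i hits 0, so fuel = i is exact for every admitted input).
def pozLoop (matrix_size max_line init_i : Int) : Nat → Int → Int → Int → Int × Int → Option (List Int)
  | 0, _, _, _, _ => none  -- unreachable: the loop is entered with counter ≥ 1
  | fuel+1, diag_nr, x, y, prev_poz =>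
    let i : Int := (fuel : Int)      -- i -= 1
    if i = 0 then
      if init_i < PySem.Int.floordiv (matrix_size * (matrix_size + 1)) 2 then
        if prev_poz.1 = 0 then
          some [x, y, prev_poz.1 + prev_poz.2 + 1, prev_poz.1 + prev_poz.2 + 1]
        else
          some [x, y, prev_poz.1 + prev_poz.2 + 1, prev_poz.1 + prev_poz.2]
      else some [x, y, matrix_size, matrix_size]
    else
      let prev' := if i = 1 then (x, y) else prev_poz
      if x = 0 ∨ y = max_line then
        let diag' := diag_nr + 1
        if diag' > max_line then
          pozLoop matrix_size max_line init_i fuel diag' max_line (diag' - max_line) prev'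
        else
          pozLoop matrix_size max_line init_i fuel diag' diag' 0 prev'
      else
        pozLoop matrix_size max_line init_i fuel diag_nr (x - 1) (y + 1) prev'

def poz (matrix_size : Int) (i : Int) : Option (List Int) :=
  if i < 1 then none
  else if i > matrix_size * matrix_size - 1 then none
  else pozLoop matrix_size (matrix_size - 1) i i.toNat 1 1 0 (0, 0)

-- ===== PORT B =====
-- B's diagonal scan: find the anti-diagonal containing index i by skipping whole diagonals.
-- Fuel (2*n).toNat bounds the number of diagonals (≤ 2n-2); never exhausted on admitted inputs.
def pozAltLoop (n i : Int) : Nat → Int → Int → Int × Int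
  | 0, d, start => (d, start)
  | fuel+1, d, start =>
    let length := if d ≤ n - 1 then d + 1 else 2*n - 1 - d
    if i < start + length then (d, start)
    else pozAltLoop n i fuel (d + 1) (start + length)

def poz_alt (matrix_size : Int) (i : Int) : Option (List Int) :=
  let n := matrix_size
  if n < 2 ∨ i < 1 ∨ i > n * n - 1 then none
  else
    let ds := pozAltLoop n i (2*n).toNat 1 1
    let d := ds.1
    let t := i - ds.2
    let xy := if d ≤ n - 1 then (d - t, t) else (n - 1 - t, d - n + 1 + t)
    if PySem.Int.floordiv (n * (n + 1)) 2 ≤ i then some [xy.1, xy.2, n, n]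
    else
      let s := if t = 0 then xy.1 + xy.2 - 1 else xy.1 + xy.2
      if xy.2 = 0 then some [xy.1, xy.2, s + 1, s + 1]
      else some [xy.1, xy.2, s + 1, s]

-- ===== PRECONDITION & SPEC =====
-- Pre_ excludes negative matrix_size combined with an index A's range guards accept (outside the
-- natural domain of a matrix traversal): there A returns coordinates lying outside any matrix
-- (e.g. poz(-3,3) = (-4,6,-3,-3)), an artifact of its walk with a negative max_line; B returns None.
def Pre_poz (matrix_size : Int) (i : Int) : Prop :=
  0 ≤ matrix_size ∨ i < 1 ∨ i > matrix_size * matrix_size - 1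
instance (matrix_size : Int) (i : Int) : Decidable (Pre_poz matrix_size i) := by unfold Pre_poz; infer_instance
def pvWitness_poz : Int × Int := (3, 4)
def Spec_poz (matrix_size : Int) (i : Int) (out : Option (List Int)) : Prop := out = poz_alt matrix_size i
instance (matrix_size : Int) (i : Int) (out : Option (List Int)) : Decidable (Spec_poz matrix_size i out) := by unfold Spec_poz; infer_instance

-- ===== CLAIM (what is proved, stated in full; the proofs are below) =====
def Claim_equal_poz : Prop := ∀ (matrix_size : Int) (i : Int), Dom_poz matrix_size i → Pre_poz matrix_size i → Spec_poz matrix_size i (poz matrix_size i)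

-- ===== LEMMAS AND PROOFS =====

-- A's loop body as a step on the state (diag_nr, x, y)
def stepA (ml : Int) (s : Int × Int × Int) : Int × Int × Int :=
  if s.2.1 = 0 ∨ s.2.2 = ml then
    if ml < s.1 + 1 then (s.1 + 1, ml, s.1 + 1 - ml) else (s.1 + 1, s.1 + 1, 0)
  else (s.1, s.2.1 - 1, s.2.2 + 1)

def iterFrom (ml : Int) (s : Int × Int × Int) : Nat → Int × Int × Int
  | 0 => s
  | k+1 => iterFrom ml (stepA ml s) k

-- A's return expression (the i == 0 branch)
def retA (n init : Int) (s : Int × Int × Int) (prev : Int × Int) : Option (List Int) :=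
  if init < PySem.Int.floordiv (n * (n + 1)) 2 then
    if prev.1 = 0 then some [s.2.1, s.2.2, prev.1 + prev.2 + 1, prev.1 + prev.2 + 1]
    else some [s.2.1, s.2.2, prev.1 + prev.2 + 1, prev.1 + prev.2]
  else some [s.2.1, s.2.2, n, n]

-- length of anti-diagonal d, and twice its starting index
def lenD (n d : Int) : Int := if d ≤ n - 1 then d + 1 else 2*n - 1 - d
def dbl (n d : Int) : Int := if d ≤ n - 1 then d*d + d else 2*n*n - (2*n - 1 - d)*(2*n - d)
-- cell of diag d at offset t
def xyF (n d t : Int) : Int × Int := if d ≤ n - 1 then (d - t, t) else (n - 1 - t, d - n + 1 + t)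

lemma iterFrom_back (ml : Int) : ∀ (k : Nat) (s : Int × Int × Int), iterFrom ml s (k+1) = stepA ml (iterFrom ml s k) := by
  intro k
  induction k with
  | zero => intro s; rfl
  | succ k ih => intro s; show iterFrom ml (stepA ml s) (k+1) = _; rw [ih]; rfl

lemma loopEq (n init : Int) : ∀ (m : Nat) (d x y : Int) (prev : Int × Int),
    pozLoop n (n-1) init (m+1) d x y prev =
      retA n init (iterFrom (n-1) (d, x, y) m)
        (if m = 0 then prev else (iterFrom (n-1) (d, x, y) (m-1)).2) := by
  intro m
  induction m with
  | zero =>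
    intro d x y prev
    simp [pozLoop, retA, iterFrom]
  | succ m ih =>
    intro d x y prev
    have hne : ¬(((m+1 : Nat) : Int) = 0) := by exact_mod_cast Nat.succ_ne_zero m
    rw [show pozLoop n (n-1) init (m+1+1) d x y prev
        = (if ((m+1 : Nat) : Int) = 0 then
            (if init < PySem.Int.floordiv (n * (n + 1)) 2 then
              if prev.1 = 0 then some [x, y, prev.1 + prev.2 + 1, prev.1 + prev.2 + 1]
              else some [x, y, prev.1 + prev.2 + 1, prev.1 + prev.2]
            else some [x, y, n, n])
          else
            (if x = 0 ∨ y = n - 1 then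
              if (d + 1 : Int) > n - 1 then
                pozLoop n (n-1) init (m+1) (d+1) (n-1) (d+1-(n-1)) (if ((m+1 : Nat) : Int) = 1 then (x, y) else prev)
              else
                pozLoop n (n-1) init (m+1) (d+1) (d+1) 0 (if ((m+1 : Nat) : Int) = 1 then (x, y) else prev)
            else
              pozLoop n (n-1) init (m+1) d (x-1) (y+1) (if ((m+1 : Nat) : Int) = 1 then (x, y) else prev)))
        from rfl]
    rw [if_neg hne]
    have key : ∀ ns : Int × Int × Int, stepA (n-1) (d, x, y) = ns →
        pozLoop n (n-1) init (m+1) ns.1 ns.2.1 ns.2.2 (if ((m+1 : Nat) : Int) = 1 then (x, y) else prev)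
          = retA n init (iterFrom (n-1) (d, x, y) (m+1))
              (if m+1 = 0 then prev else (iterFrom (n-1) (d, x, y) (m+1-1)).2) := by
      intro ns hs
      rw [ih ns.1 ns.2.1 ns.2.2]
      have hit : iterFrom (n-1) (d, x, y) (m+1) = iterFrom (n-1) ns m := by
        show iterFrom (n-1) (stepA (n-1) (d, x, y)) m = _
        rw [hs]
      rw [hit]
      congr 1
      by_cases hm : m = 0
      · subst hm
        norm_num [iterFrom]
      · rw [if_neg hm, if_neg (Nat.succ_ne_zero m)]
        obtain ⟨k, rfl⟩ : ∃ k, m = k + 1 := ⟨m - 1, by omega⟩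
        congr 1
        show iterFrom (n-1) ns (k+1-1) = iterFrom (n-1) (d, x, y) (k+1+1-1)
        rw [show (k+1+1-1 : Nat) = (k+1-1)+1 from rfl]
        show _ = iterFrom (n-1) (stepA (n-1) (d, x, y)) (k+1-1)
        rw [hs]
    by_cases hb : x = 0 ∨ y = n - 1
    · rw [if_pos hb]
      by_cases hd : (d + 1 : Int) > n - 1
      · rw [if_pos hd]
        exact key (d+1, n-1, d+1-(n-1)) (by unfold stepA; rw [if_pos hb, if_pos hd])
      · rw [if_neg hd]
        exact key (d+1, d+1, 0) (by unfold stepA; rw [if_pos hb, if_neg hd])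
    · rw [if_neg hb]
      exact key (d, x-1, y+1) (by unfold stepA; rw [if_neg hb])

lemma dbl_succ (n d : Int) (hn : 2 ≤ n) (h1 : 1 ≤ d) (h2 : d ≤ 2*n - 3) :
    dbl n (d+1) = dbl n d + 2 * lenD n d := by
  unfold dbl lenD
  split_ifs with h1' h2' h3'
  · ring
  · omega
  · have hd : d = n - 1 := by omega
    subst hd; ring
  · ring

lemma dbl_mono (n a b : Int) (hn : 2 ≤ n) (h1 : 1 ≤ a) (hab : a ≤ b) (hb : b ≤ 2*n - 2) :
    dbl n a ≤ dbl n b := by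
  unfold dbl
  split_ifs with ha' hb' hb''
  · nlinarith
  · nlinarith [sq_nonneg (n - 1 - a), sq_nonneg (2*n - 1 - b)]
  · omega
  · nlinarith

lemma altLoop_find (n i : Int) (hn : 2 ≤ n) (hi2 : i ≤ n*n - 1) :
    ∀ (fuel : Nat) (d st : Int), 1 ≤ d → d ≤ 2*n - 2 → 2*st = dbl n d → st ≤ i →
      (2*n - 1 - d).toNat ≤ fuel →
      ∃ D ST, pozAltLoop n i fuel d st = (D, ST) ∧ 1 ≤ D ∧ D ≤ 2*n - 2 ∧
        2*ST = dbl n D ∧ ST ≤ i ∧ i < ST + lenD n D := by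
  intro fuel
  induction fuel with
  | zero => intro d st h1 h2 _ _ hf; omega
  | succ fuel ih =>
    intro d st h1 h2 hinv hle hf
    rw [show pozAltLoop n i (fuel+1) d st
        = if i < st + lenD n d then (d, st) else pozAltLoop n i fuel (d+1) (st + lenD n d) from rfl]
    by_cases hlt : i < st + lenD n d
    · rw [if_pos hlt]; exact ⟨d, st, rfl, h1, h2, hinv, hle, hlt⟩
    · rw [if_neg hlt]
      have hlenpos : 1 ≤ lenD n d := by unfold lenD; split_ifs <;> omega
      have hne : d ≠ 2*n - 2 := by
        intro hd
        have e1 : dbl n d = 2*(n*n) - 2 := by subst hd; unfold dbl; rw [if_neg (by omega)]; ring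
        have e2 : lenD n d = 1 := by subst hd; unfold lenD; rw [if_neg (by omega)]; omega
        rw [e1] at hinv
        omega
      have hsucc := dbl_succ n d hn h1 (by omega)
      exact ih (d+1) (st + lenD n d) (by omega) (by omega) (by omega) (by omega) (by omega)

lemma iter_cell (n : Int) (hn : 2 ≤ n) : ∀ (k : Nat) (d st : Int),
    (k:Int) + 1 ≤ n*n - 1 → 1 ≤ d → d ≤ 2*n - 2 → 2*st = dbl n d →
    st ≤ (k:Int) + 1 → (k:Int) + 1 < st + lenD n d →
    iterFrom (n-1) (1, 1, 0) k = (d, xyF n d ((k:Int) + 1 - st)) := by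
  intro k
  induction k with
  | zero =>
    intro d st hbound h1 h2 hinv hle hlt
    have hle' : st ≤ 1 := by exact_mod_cast hle
    have hd1 : d = 1 := by
      by_contra hne
      have hmono := dbl_mono n 2 d hn (by omega) (by omega) h2
      have h6 : dbl n 2 = 6 := by
        unfold dbl
        split_ifs with h
        · ring
        · have hn2 : n = 2 := by omega
          subst hn2; norm_num
      omega
    subst hd1
    have hst : st = 1 := by
      have h2d : dbl n 1 = 2 := by unfold dbl; rw [if_pos (by omega : (1:Int) ≤ n - 1)]; ring
      omega
    subst hst
    show (1, 1, 0) = (1, xyF n 1 ((0:Nat) + 1 - 1))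
    unfold xyF
    rw [if_pos (by omega : (1:Int) ≤ n - 1)]
    norm_num
  | succ k ih =>
    intro d st hbound h1 h2 hinv hle hlt
    have hc : ((k+1 : Nat) : Int) = (k:Int) + 1 := by push_cast; ring
    rw [hc] at hbound hle hlt ⊢
    rw [iterFrom_back]
    by_cases hcase : st ≤ (k:Int) + 1
    · -- index k+2 lies on the same diagonal as k+1
      have hlt' : (k:Int) + 1 < st + lenD n d := by omega
      rw [ih d st (by omega) h1 h2 hinv hcase hlt']
      by_cases hdu : d ≤ n - 1
      · have hlen : lenD n d = d + 1 := by unfold lenD; rw [if_pos hdu]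
        rw [hlen] at hlt
        rw [show xyF n d ((k:Int)+1-st) = (d - ((k:Int)+1-st), (k:Int)+1-st) by
          unfold xyF; rw [if_pos hdu]]
        dsimp only [stepA, xyF]
        split_ifs with hc1 hc2 <;> simp only [Prod.mk.injEq, true_and, and_true] <;>
          first
            | omega
            | (rcases hc1 with hx | hy <;> omega)
            | (push_neg at hc1; omega)
      · have hlen : lenD n d = 2*n - 1 - d := by unfold lenD; rw [if_neg hdu]
        rw [hlen] at hlt
        rw [show xyF n d ((k:Int)+1-st) = (n - 1 - ((k:Int)+1-st), d - n + 1 + ((k:Int)+1-st)) by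
          unfold xyF; rw [if_neg hdu]]
        dsimp only [stepA, xyF]
        split_ifs with hc1 hc2 <;> simp only [Prod.mk.injEq, true_and, and_true] <;>
          first
            | omega
            | (rcases hc1 with hx | hy <;> omega)
            | (push_neg at hc1; omega)
    · -- index k+2 is the first cell of diagonal d; k+1 is the last cell of diagonal d-1
      have hst : st = (k:Int) + 2 := by omega
      have hd2 : 2 ≤ d := by
        by_contra hne
        have hd1 : d = 1 := by omega
        have h2d : dbl n 1 = 2 := by unfold dbl; rw [if_pos (by omega : (1:Int) ≤ n - 1)]; ring
        rw [hd1] at hinv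
        omega
      have hsucc : dbl n (d - 1 + 1) = dbl n (d - 1) + 2 * lenD n (d - 1) :=
        dbl_succ n (d - 1) hn (by omega) (by omega)
      rw [show d - 1 + 1 = d by ring] at hsucc
      have hlen0pos : 1 ≤ lenD n (d - 1) := by unfold lenD; split_ifs <;> omega
      have hIH := ih (d - 1) (st - lenD n (d - 1)) (by omega) (by omega) (by omega)
        (by omega) (by omega) (by omega)
      rw [hIH]
      by_cases hd0u : d - 1 ≤ n - 1
      · have hlen0 : lenD n (d - 1) = d := by unfold lenD; rw [if_pos hd0u]; ring
        rw [hlen0] at hsucc hIH ⊢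
        rw [show xyF n (d-1) ((k:Int)+1-(st - d)) = (d - 1 - ((k:Int)+1-(st-d)), (k:Int)+1-(st-d)) by
          unfold xyF; rw [if_pos hd0u]]
        dsimp only [stepA, xyF]
        split_ifs with hc1 hc2 <;> simp only [Prod.mk.injEq, true_and, and_true] <;>
          first
            | omega
            | (rcases hc1 with hx | hy <;> omega)
            | (push_neg at hc1; omega)
      · have hlen0 : lenD n (d - 1) = 2*n - d := by unfold lenD; rw [if_neg hd0u]; ring
        rw [hlen0] at hsucc hIH ⊢
        rw [show xyF n (d-1) ((k:Int)+1-(st - (2*n - d)))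
            = (n - 1 - ((k:Int)+1-(st - (2*n - d))), d - 1 - n + 1 + ((k:Int)+1-(st - (2*n - d)))) by
          unfold xyF; rw [if_neg hd0u]]
        dsimp only [stepA, xyF]
        split_ifs with hc1 hc2 <;> simp only [Prod.mk.injEq, true_and, and_true] <;>
          first
            | omega
            | (rcases hc1 with hx | hy <;> omega)
            | (push_neg at hc1; omega)

-- ===== VERDICT (by name: the statement is the Claim_ definition above) =====
lemma dbl_one (n : Int) (hn : 2 ≤ n) : dbl n 1 = 2 := by
  unfold dbl; rw [if_pos (by omega : (1:Int) ≤ n - 1)]; ring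

lemma poz_alt_guard (n i : Int) (h : n < 2 ∨ i < 1 ∨ i > n * n - 1) : poz_alt n i = none := by
  simp only [poz_alt]
  rw [if_pos h]

theorem poz_spec : Claim_equal_poz := by
  unfold Claim_equal_poz Spec_poz Pre_poz
  intro n i _ hpre
  by_cases hg : n < 2 ∨ i < 1 ∨ i > n * n - 1
  · rw [poz_alt_guard n i hg]
    unfold poz
    split_ifs with a b
    · rfl
    · rfl
    · exfalso
      rcases hg with h | h | h
      · rcases hpre with hp | hp | hp
        · have h01 : n = 0 ∨ n = 1 := by omega
          rcases h01 with rfl | rfl <;> omega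
        · omega
        · omega
      · omega
      · omega
  · push_neg at hg
    obtain ⟨hn2', hi1, hi2⟩ := hg
    have hn : 2 ≤ n := by omega
    have hi1' : 1 ≤ i := by omega
    have hi2' : i ≤ n * n - 1 := by omega
    -- B's diagonal search result
    obtain ⟨D, ST, hres, hD1, hD2, hDinv, hDle, hDlt⟩ :=
      altLoop_find n i hn hi2' (2*n).toNat 1 1 (by omega) (by omega)
        (by rw [dbl_one n hn]; omega) hi1' (by omega)
    have halt : poz_alt n i =
        (if PySem.Int.floordiv (n * (n + 1)) 2 ≤ i then
          some [(xyF n D (i - ST)).1, (xyF n D (i - ST)).2, n, n]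
        else
          if (xyF n D (i - ST)).2 = 0 then
            some [(xyF n D (i - ST)).1, (xyF n D (i - ST)).2,
              (if i - ST = 0 then (xyF n D (i - ST)).1 + (xyF n D (i - ST)).2 - 1
               else (xyF n D (i - ST)).1 + (xyF n D (i - ST)).2) + 1,
              (if i - ST = 0 then (xyF n D (i - ST)).1 + (xyF n D (i - ST)).2 - 1
               else (xyF n D (i - ST)).1 + (xyF n D (i - ST)).2) + 1]
          else
            some [(xyF n D (i - ST)).1, (xyF n D (i - ST)).2,
              (if i - ST = 0 then (xyF n D (i - ST)).1 + (xyF n D (i - ST)).2 - 1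
               else (xyF n D (i - ST)).1 + (xyF n D (i - ST)).2) + 1,
              (if i - ST = 0 then (xyF n D (i - ST)).1 + (xyF n D (i - ST)).2 - 1
               else (xyF n D (i - ST)).1 + (xyF n D (i - ST)).2)]) := by
      simp only [poz_alt]
      rw [if_neg (by omega), hres]
      rfl
    rw [halt]
    -- A's loop result
    have hpoz : poz n i = pozLoop n (n-1) i i.toNat 1 1 0 (0, 0) := by
      simp only [poz]
      rw [if_neg (by omega), if_neg (by omega)]
    obtain ⟨m, hm⟩ : ∃ m : Nat, i.toNat = m + 1 := ⟨i.toNat - 1, by omega⟩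
    have hmi : (m : Int) + 1 = i := by omega
    rw [hpoz, hm, loopEq]
    have hiter := iter_cell n hn m D ST (by omega) hD1 hD2 hDinv (by omega) (by omega)
    rw [hmi] at hiter
    rw [hiter]
    dsimp only [retA]
    -- the floordiv pivot
    obtain ⟨c, hc⟩ := Int.even_mul_succ_self n
    have hT : PySem.Int.floordiv (n * (n + 1)) 2 = c := by
      rw [PySem.Int.floordiv_eq_ediv_of_pos (by norm_num), hc]
      omega
    have hc' : n * n + n = c + c := by linear_combination hc
    have hdn : dbl n n = n * n + n := by unfold dbl; rw [if_neg (by omega)]; ring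
    rw [hT]
    by_cases hti : i < c
    · rw [if_pos hti, if_neg (show ¬(c ≤ i) by omega)]
      by_cases hm0 : m = 0
      · -- i = 1
        subst hm0
        have hi1e : i = 1 := by omega
        have hD1' : D = 1 := by
          have h := hiter
          rw [Prod.ext_iff] at h
          exact h.1.symm
        subst hD1'
        have hST1 : ST = 1 := by rw [dbl_one n hn] at hDinv; omega
        subst hST1
        rw [if_pos rfl, hi1e]
        have hxy : xyF n 1 (1 - 1) = (1, 0) := by
          unfold xyF; rw [if_pos (by omega : (1:Int) ≤ n - 1)]; norm_num
        rw [hxy]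
        norm_num
      · -- i ≥ 2: prev is the cell of index i-1
        obtain ⟨m', rfl⟩ : ∃ m', m = m' + 1 := ⟨m - 1, by omega⟩
        have hi2'' : 2 ≤ i := by omega
        rw [if_neg hm0]
        have hm'i : (m' : Int) + 1 = i - 1 := by push_cast at hmi ⊢; omega
        by_cases ht0 : i - ST = 0
        · -- first cell of diagonal D
          have hDub : D ≤ n - 1 := by
            by_contra hcon
            have hmono := dbl_mono n n D hn (by omega) (by omega) hD2
            rw [hdn] at hmono
            omega
          have hD2' : 2 ≤ D := by
            by_contra hcon
            have hD1e : D = 1 := by omega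
            rw [hD1e, dbl_one n hn] at hDinv
            omega
          have hsucc : dbl n (D - 1 + 1) = dbl n (D - 1) + 2 * lenD n (D - 1) :=
            dbl_succ n (D - 1) hn (by omega) (by omega)
          rw [show D - 1 + 1 = D by ring] at hsucc
          have hlen0 : lenD n (D - 1) = D := by
            unfold lenD; rw [if_pos (by omega)]; ring
          rw [hlen0] at hsucc
          have hprev := iter_cell n hn m' (D - 1) (ST - D) (by omega) (by omega) (by omega)
            (by omega) (by omega)
            (by rw [hlen0]; omega)
          rw [show (m' : Int) + 1 - (ST - D) = D - 1 by omega] at hprev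
          rw [show (m' + 1 - 1 : Nat) = m' from rfl, hprev]
          have hxyp : xyF n (D - 1) (D - 1) = (0, D - 1) := by
            unfold xyF; rw [if_pos (by omega)]; norm_num
          have hxy : xyF n D (i - ST) = (D, 0) := by
            unfold xyF; rw [if_pos hDub, ht0]; norm_num
          rw [hxyp, hxy, if_pos ht0]
          dsimp only
          norm_num
        · -- interior cell: previous cell is on the same diagonal
          have hprev := iter_cell n hn m' D ST (by omega) hD1 hD2 hDinv
            (by omega) (by omega)
          rw [show (m' + 1 - 1 : Nat) = m' from rfl, hprev, hm'i]
          rw [if_neg ht0]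
          by_cases hDub : D ≤ n - 1
          · have hlenu : lenD n D = D + 1 := by unfold lenD; rw [if_pos hDub]
            rw [hlenu] at hDlt
            have hxyp : xyF n D (i - 1 - ST) = (D - (i - 1 - ST), i - 1 - ST) := by
              unfold xyF; rw [if_pos hDub]
            have hxy : xyF n D (i - ST) = (D - (i - ST), i - ST) := by
              unfold xyF; rw [if_pos hDub]
            rw [hxyp, hxy]
            dsimp only
            rw [if_neg (by omega : ¬(D - (i - 1 - ST) = 0)), if_neg ht0]
            simp only [Option.some.injEq, List.cons.injEq, and_true, true_and]
            omega
          · have hlenl : lenD n D = 2*n - 1 - D := by unfold lenD; rw [if_neg hDub]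
            rw [hlenl] at hDlt
            have hxyp : xyF n D (i - 1 - ST)
                = (n - 1 - (i - 1 - ST), D - n + 1 + (i - 1 - ST)) := by
              unfold xyF; rw [if_neg hDub]
            have hxy : xyF n D (i - ST) = (n - 1 - (i - ST), D - n + 1 + (i - ST)) := by
              unfold xyF; rw [if_neg hDub]
            rw [hxyp, hxy]
            dsimp only
            rw [if_neg (by omega : ¬(n - 1 - (i - 1 - ST) = 0)),
              if_neg (by omega : ¬(D - n + 1 + (i - ST) = 0))]
            simp only [Option.some.injEq, List.cons.injEq, and_true, true_and]
            omega
    · rw [if_neg hti, if_pos (show c ≤ i by omega)]
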